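-- pv_equiv track=rewrite | github.com/Roy84-prog/roys-workbook | 모의고사 교재 만들기.py | insert_page_numbers
-- ===== SOURCE A (Python) =====
-- def insert_page_numbers(html_str):
--     parts = html_str.split('__PAGE_NUM__')
--     if len(parts) <= 1:
--         return html_str
--     res = parts[0]
--     for i, p in enumerate(parts[1:], 1):
--         res += str(i) + p
--     return res
-- ===== SOURCE B (Python) =====
-- def insert_page_numbers(html_str):
--     token = '__PAGE_NUM__'
--     out = []
--     n = 1
--     i = 0
--     L = len(html_str)
--     t = len(token)
--     while i < L:
--         if html_str.startswith(token, i):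
--             out.append(str(n))
--             n += 1
--             i += t
--         else:
--             out.append(html_str[i])
--             i += 1
--     return ''.join(out)
-- ===== Notes on version B (the rewrite author's own statement) =====
-- stated objective: alternative
-- what changed: replaces split-on-placeholder plus enumerate-and-concatenate rebuilding with a single left-to-right character scan that emits the next counter value whenever the placeholder starts at the current position
import Mathlib
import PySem

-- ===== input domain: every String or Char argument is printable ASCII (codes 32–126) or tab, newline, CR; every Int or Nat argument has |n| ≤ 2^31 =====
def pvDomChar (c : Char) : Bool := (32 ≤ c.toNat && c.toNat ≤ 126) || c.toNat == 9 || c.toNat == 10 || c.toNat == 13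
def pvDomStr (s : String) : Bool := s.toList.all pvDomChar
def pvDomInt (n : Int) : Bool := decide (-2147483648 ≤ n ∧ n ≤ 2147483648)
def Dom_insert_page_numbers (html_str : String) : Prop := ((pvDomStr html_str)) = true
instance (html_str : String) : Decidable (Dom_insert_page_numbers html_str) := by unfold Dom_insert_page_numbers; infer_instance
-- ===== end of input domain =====

-- B replaces A's split-and-rejoin with one left-to-right scan emitting counter values at each placeholder; alternative decomposition, same cost.

-- ===== PORT A =====
-- parts = html_str.split('__PAGE_NUM__'); if len(parts) <= 1: return html_str;
-- res = parts[0]; for i, p in enumerate(parts[1:], 1): res += str(i) + p; return res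
def insert_page_numbers (html_str : String) : String :=
  let parts := PySem.Chars.splitOn html_str.toList "__PAGE_NUM__".toList
  if parts.length ≤ 1 then html_str
  else
    let res := PySem.List.pyGetD parts 0 []
    String.ofList ((PySem.List.enumerate (parts.drop 1) 1).foldl
      (fun res ip => res ++ PySem.Int.toChars ip.1 ++ ip.2) res)

-- ===== PORT B =====
def pvTok : List Char := "__PAGE_NUM__".toList

-- the while loop of Source B: advance position by position; where the token starts, emit str(n) and skip it
def pvScan : List Char → Int → List Char
  | [], _ => []
  | c :: rest, n =>
    if pvTok.isPrefixOf (c :: rest) then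
      PySem.Int.toChars n ++ pvScan ((c :: rest).drop pvTok.length) (n + 1)
    else
      c :: pvScan rest n
termination_by l => l.length
decreasing_by
  · simp [pvTok]
  · simp

def insert_page_numbers_alt (html_str : String) : String :=
  String.ofList (pvScan html_str.toList 1)

-- ===== PRECONDITION & SPEC =====
def Spec_insert_page_numbers (html_str : String) (out : String) : Prop := out = insert_page_numbers_alt html_str
instance (html_str : String) (out : String) : Decidable (Spec_insert_page_numbers html_str out) := by unfold Spec_insert_page_numbers; infer_instance

-- ===== CLAIM (what is proved, stated in full; the proofs are below) =====
def Claim_equal_insert_page_numbers : Prop := ∀ (html_str : String), Dom_insert_page_numbers html_str → Spec_insert_page_numbers html_str (insert_page_numbers html_str)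

-- ===== LEMMAS AND PROOFS =====

-- head and tail of A's split result, as one natural recursion over the input
def pvSplitRec : List Char → List Char × List (List Char)
  | [] => ([], [])
  | c :: rest =>
    if pvTok.isPrefixOf (c :: rest) then
      let r := pvSplitRec ((c :: rest).drop pvTok.length)
      ([], r.1 :: r.2)
    else
      let r := pvSplitRec rest
      (c :: r.1, r.2)
termination_by l => l.length
decreasing_by
  · simp [pvTok]
  · simp

-- rejoin of the tail parts, numbered from n
def pvNumJoin : Int → List (List Char) → List Char
  | _, [] => []
  | n, p :: ps => PySem.Int.toChars n ++ p ++ pvNumJoin (n + 1) ps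

theorem pvGo_eq (fuel : Nat) : ∀ (l cur : List Char) (acc : List (List Char)),
    l.length ≤ fuel →
    PySem.Chars.splitOn.go pvTok fuel l cur acc
      = acc.reverse ++ (cur.reverse ++ (pvSplitRec l).1) :: (pvSplitRec l).2 := by
  induction fuel using Nat.strong_induction_on with
  | _ fuel ih =>
    intro l cur acc hl
    match fuel, l with
    | 0, [] =>
      simp [PySem.Chars.splitOn.go, pvSplitRec]
    | fuel+1, [] =>
      simp [PySem.Chars.splitOn.go, pvSplitRec]
    | fuel+1, c :: rest =>
      rw [PySem.Chars.splitOn.go]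
      by_cases hp : pvTok.isPrefixOf (c :: rest)
      · rw [pvSplitRec]
        simp only [hp, if_true]
        rw [ih fuel (by omega) _ _ _ (by simp [pvTok] at hl ⊢; omega)]
        simp
      · rw [pvSplitRec]
        simp only [hp, if_false, Bool.false_eq_true]
        rw [ih fuel (by omega) _ _ _ (by simp at hl; omega)]
        simp

theorem pvSplitOn_eq (l : List Char) :
    PySem.Chars.splitOn l pvTok = (pvSplitRec l).1 :: (pvSplitRec l).2 := by
  rw [PySem.Chars.splitOn, pvGo_eq (l.length + 1) l [] [] (by omega)]
  simp

theorem pvFoldl_enum (ps : List (List Char)) : ∀ (n : Int) (res : List Char),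
    (PySem.List.enumerate ps n).foldl (fun res ip => res ++ PySem.Int.toChars ip.1 ++ ip.2) res
      = res ++ pvNumJoin n ps := by
  induction ps with
  | nil => intro n res; simp [PySem.List.enumerate_nil, pvNumJoin]
  | cons p ps ih =>
    intro n res
    rw [PySem.List.enumerate_cons]
    simp only [List.foldl_cons, ih, pvNumJoin]
    simp

theorem pvScan_eq (l : List Char) (n : Int) :
    pvScan l n = (pvSplitRec l).1 ++ pvNumJoin n (pvSplitRec l).2 := by
  induction l, n using pvScan.induct with
  | case1 n => simp [pvScan, pvSplitRec, pvNumJoin]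
  | case2 c rest n hp ih =>
    rw [pvScan, pvSplitRec]
    simp only [hp, if_true, ih]
    rcases h : pvSplitRec ((c :: rest).drop pvTok.length) with ⟨h1, t1⟩
    simp [pvNumJoin]
  | case3 c rest n hp ih =>
    rw [pvScan, pvSplitRec]
    simp only [hp, if_false, Bool.false_eq_true, ih]
    simp

theorem pvSplitRec_snd_nil (l : List Char) : (pvSplitRec l).2 = [] → (pvSplitRec l).1 = l := by
  induction l using pvSplitRec.induct with
  | case1 => simp [pvSplitRec]
  | case2 c rest hp ih => intro h; rw [pvSplitRec] at h; simp [hp] at h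
  | case3 c rest hp ih =>
    intro h; rw [pvSplitRec] at h ⊢; simp only [hp, if_false, Bool.false_eq_true] at h ⊢
    simp only [List.cons.injEq, true_and]
    exact ih h

-- ===== VERDICT (by name: the statement is the Claim_ definition above) =====
theorem insert_page_numbers_spec : Claim_equal_insert_page_numbers := by
  intro html _
  unfold Spec_insert_page_numbers insert_page_numbers insert_page_numbers_alt
  rw [show ("__PAGE_NUM__".toList) = pvTok from rfl, pvSplitOn_eq html.toList]
  by_cases h : (pvSplitRec html.toList).2 = []
  · simp only [h, List.length_cons, List.length_nil, if_pos (by omega : 0 + 1 ≤ 1)]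
    rw [pvScan_eq, h, pvSplitRec_snd_nil html.toList h, pvNumJoin]
    simp [String.ofList_toList]
  · have hlen : ¬ ((pvSplitRec html.toList).1 :: (pvSplitRec html.toList).2).length ≤ 1 := by
      rcases List.exists_cons_of_ne_nil h with ⟨p, ps, hps⟩
      simp [hps]
    rw [if_neg hlen]
    simp only [List.drop_succ_cons, List.drop_zero]
    rw [pvFoldl_enum, pvScan_eq]
    congr 1
    simp [PySem.List.pyGetD, PySem.List.pyGet?, PySem.List.pyIdx?]
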